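-- pv_equiv track=rewrite | github.com/nikunjpanchal22/code_clone_classification | python_t1_t2_full/Gpt_false_pair_3009.py | consec
-- ===== SOURCE A (Python) =====
-- def consec(n, iterable) :
-- 	result = set()
-- 	prev = None
-- 	count = 0
-- 	for item in iterable :
-- 		if item == prev :
-- 			count += 1
-- 		else :
-- 			count = 1
-- 			prev = item
-- 		if count == n :
-- 			result.add(prev)
-- 	return result
-- ===== SOURCE B (Python) =====
-- def consec(n, iterable):
--     # Sliding-window rewrite: an item has n consecutive occurrences exactly when
--     # some length-n window of the list is constant; collect the head of each
--     # constant window (set.add keeps the first trigger, like A).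
--     items = list(iterable)
--     result = set()
--     if n >= 1:
--         for i in range(n - 1, len(items)):
--             w = items[i - n + 1 : i + 1]
--             if w and w.count(w[0]) == n:
--                 result.add(w[0])
--     return result
-- ===== Notes on version B (the rewrite author's own statement) =====
-- stated objective: alternative
-- what changed: B tests every length-n sliding window for constancy (slice + count) and adds the window's head element, instead of A's single-pass prev/count run-length state machine; it trades A's O(len) scan for a simpler window test costing O(len*n).
import Mathlib
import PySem

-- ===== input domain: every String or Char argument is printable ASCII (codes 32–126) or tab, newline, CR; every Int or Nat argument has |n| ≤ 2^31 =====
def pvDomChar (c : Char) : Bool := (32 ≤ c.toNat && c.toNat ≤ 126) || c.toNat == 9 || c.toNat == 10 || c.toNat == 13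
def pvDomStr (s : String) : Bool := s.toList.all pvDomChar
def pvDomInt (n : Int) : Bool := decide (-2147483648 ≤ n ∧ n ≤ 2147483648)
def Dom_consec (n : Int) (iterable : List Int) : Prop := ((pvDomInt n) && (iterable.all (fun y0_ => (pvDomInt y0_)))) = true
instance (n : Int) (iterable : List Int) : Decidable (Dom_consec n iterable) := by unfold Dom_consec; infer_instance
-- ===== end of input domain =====

-- B replaces A's single-pass prev/count run-length state machine by a sliding-window
-- test: an item runs n times consecutively iff some length-n window is constant
-- (alternative algorithm; B does more work per element, no speed claim).

-- ===== PORT A =====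
-- the for-loop over (prev, count, result); prev starts as None (Option Int)
def consecLoop (n : Int) : List Int → Option Int → Int → PySem.Set Int → PySem.Set Int
  | [], _, _, result => result
  | item :: rest, prev, count, result =>
    let (count', prev') := if some item == prev then (count + 1, prev) else (1, some item)
    -- result.add(prev): at this point prev' = some item in both branches
    let result' := if count' == n then
        (match prev' with | some p => PySem.Set.add result p | none => result)
      else result
    consecLoop n rest prev' count' result'

def consec (n : Int) (iterable : List Int) : List Int :=
  consecLoop n iterable none 0 PySem.Set.empty

-- ===== PORT B =====
-- loop body of Source B: w = items[i-n+1 : i+1]; if w and w.count(w[0]) == n: result.add(w[0])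
def consecAltStep (n : Int) (items : List Int) (r : PySem.Set Int) (i : Int) : PySem.Set Int :=
  match PySem.List.slice items (some (i - n + 1)) (some (i + 1)) with
  | [] => r
  | x :: t => if ((PySem.List.count (x :: t) x : Int) == n) then PySem.Set.add r x else r

-- 'if n >= 1: for i in range(n - 1, len(items)): …'
def consec_alt (n : Int) (iterable : List Int) : List Int :=
  if 1 ≤ n then
    (PySem.List.pyRange (n - 1) (iterable.length : Int) 1).foldl (consecAltStep n iterable) PySem.Set.empty
  else PySem.Set.empty

-- ===== PRECONDITION & SPEC =====
def Spec_consec (n : Int) (iterable : List Int) (out : List Int) : Prop := out = consec_alt n iterable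
instance (n : Int) (iterable : List Int) (out : List Int) : Decidable (Spec_consec n iterable out) := by unfold Spec_consec; infer_instance

-- ===== CLAIM (what is proved, stated in full; the proofs are below) =====
def Claim_equal_consec : Prop := ∀ (n : Int) (iterable : List Int), Dom_consec n iterable → Spec_consec n iterable (consec n iterable)

-- ===== LEMMAS AND PROOFS =====

-- common reference point of the two proofs: fold over maximal runs, adding a run's
-- key when its length is at least n
def runScan (n : Int) : List Int → PySem.Set Int → PySem.Set Int
  | [], r => r
  | x :: xs, r =>
    runScan n (xs.dropWhile (· == x))
      (if n ≤ ((xs.takeWhile (· == x)).length : Int) + 1 then PySem.Set.add r x else r)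
  termination_by l _ => l.length
  decreasing_by
    simp only [List.length_cons]
    exact Nat.lt_succ_of_le (List.length_dropWhile_le _ _)

-- ---- A side ----

-- when n ≤ 0 the trigger count' == n never fires (count' ≥ 1)
lemma consecLoop_nonpos (n : Int) (hn : n ≤ 0) :
    ∀ (l : List Int) (prev : Option Int) (c : Int) (r : PySem.Set Int),
      0 ≤ c → consecLoop n l prev c r = r := by
  intro l
  induction l with
  | nil => intro prev c r _; simp [consecLoop]
  | cons x xs ih =>
    intro prev c r hc
    simp only [consecLoop]
    by_cases h : (some x == prev) = true <;>
      simp only [h, Bool.false_eq_true, if_true, if_false,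
        show ((c + 1 : Int) == n) = false by simp; omega,
        show ((1 : Int) == n) = false by simp; omega] <;>
      exact ih _ _ _ (by omega)

-- consuming j further copies of x while prev = some x: count advances by j,
-- x is added iff the count passes n on the way
lemma consecLoop_run (n x : Int) :
    ∀ (j : ℕ) (rest : List Int) (c : Int) (r : PySem.Set Int),
      consecLoop n (List.replicate j x ++ rest) (some x) c r =
        consecLoop n rest (some x) (c + j)
          (if c < n ∧ n ≤ c + j then PySem.Set.add r x else r) := by
  intro j
  induction j with
  | zero =>
    intro rest c r
    simp only [List.replicate, List.nil_append, Nat.cast_zero, add_zero]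
    rw [if_neg (by omega)]
  | succ j ih =>
    intro rest c r
    simp only [List.replicate_succ, List.cons_append, consecLoop, BEq.rfl, if_true]
    rw [ih]
    have hcast : (((j + 1 : ℕ)) : Int) = (j : Int) + 1 := by push_cast; ring
    by_cases h1 : ((c + 1 : Int) == n) = true
    · have hn : c + 1 = n := by simpa using h1
      rw [if_pos h1, if_neg (by omega), if_pos (by rw [hcast]; omega)]
      congr 1
      rw [hcast]; ring
    · have hn : c + 1 ≠ n := by simpa using h1
      rw [if_neg h1]
      have hiff : (c + 1 < n ∧ n ≤ c + 1 + (j : Int)) ↔ (c < n ∧ n ≤ c + (((j + 1 : ℕ)) : Int)) := by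
        rw [hcast]; constructor <;> intro h <;> omega
      rw [if_congr hiff rfl rfl]
      congr 1
      rw [hcast]; ring

-- elements of takeWhile (· == x) are x, so that prefix is a replicate
lemma takeWhile_eq_replicate (x : Int) (l : List Int) :
    l.takeWhile (· == x) = List.replicate (l.takeWhile (· == x)).length x := by
  rw [List.eq_replicate_iff]
  exact ⟨rfl, fun b hb => by simpa using List.mem_takeWhile_imp hb⟩

-- the element after a dropped run does not satisfy the predicate
lemma head?_dropWhile {α : Type} (p : α → Bool) :
    ∀ (l : List α) (y : α), (l.dropWhile p).head? = some y → p y = false := by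
  intro l
  induction l with
  | nil => intro y h; simp [List.dropWhile] at h
  | cons a as ih =>
    intro y h
    cases hp : p a with
    | true => exact ih y (by simpa [List.dropWhile, hp] using h)
    | false =>
      simp [List.dropWhile, hp] at h
      rw [← h]; exact hp

-- processing one whole maximal run from a fresh prev
lemma consecLoop_group (n x : Int) (xs : List Int) (prev : Option Int) (c : Int)
    (r : PySem.Set Int) (hprev : prev ≠ some x) :
    consecLoop n (x :: xs) prev c r =
      consecLoop n (xs.dropWhile (· == x)) (some x)
        (1 + (xs.takeWhile (· == x)).length)
        (if 1 ≤ n ∧ n ≤ 1 + ((xs.takeWhile (· == x)).length : Int) then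
           PySem.Set.add r x else r) := by
  have hbeq : (some x == prev) = false := by
    simp only [beq_eq_false_iff_ne]; exact fun h => hprev h.symm
  simp only [consecLoop, hbeq, Bool.false_eq_true, if_false]
  conv_lhs => rw [← List.takeWhile_append_dropWhile (p := (· == x)) (l := xs),
                  takeWhile_eq_replicate x xs]
  rw [consecLoop_run]
  by_cases h1 : ((1 : Int) == n) = true
  · have hn : n = 1 := by have := eq_of_beq h1; omega
    rw [if_pos h1, if_neg (by omega), if_pos (by constructor <;> omega)]
  · have hn : n ≠ 1 := fun h => h1 (by simp [h.symm])
    rw [if_neg h1]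
    have hiff : (1 < n ∧ n ≤ 1 + ((xs.takeWhile (· == x)).length : Int)) ↔
           (1 ≤ n ∧ n ≤ 1 + ((xs.takeWhile (· == x)).length : Int)) := by
      constructor <;> intro h <;> exact ⟨by omega, h.2⟩
    rw [if_congr hiff rfl rfl]

-- A's loop computes the run scan, from any fresh state
lemma consecLoop_eq_runScan (n : Int) (hn : 1 ≤ n) :
    ∀ (k : ℕ) (l : List Int), l.length ≤ k → ∀ (prev : Option Int) (c : Int) (r : PySem.Set Int),
      (∀ x, l.head? = some x → prev ≠ some x) →
      consecLoop n l prev c r = runScan n l r := by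
  intro k
  induction k with
  | zero =>
    intro l hl prev c r _
    rw [List.length_eq_zero_iff.mp (Nat.le_zero.mp hl)]
    simp [consecLoop, runScan]
  | succ k ih =>
    intro l hl prev c r hfresh
    match l with
    | [] => simp [consecLoop, runScan]
    | x :: xs =>
      rw [consecLoop_group n x xs prev c r (hfresh x rfl), runScan]
      have hlen : (xs.dropWhile (· == x)).length ≤ k :=
        le_trans (List.length_dropWhile_le _ _) (by simpa using hl)
      rw [ih _ hlen]
      · congr 1
        by_cases h : n ≤ ((xs.takeWhile (· == x)).length : Int) + 1
        · rw [if_pos h, if_pos (by omega)]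
        · rw [if_neg h, if_neg (by omega)]
      · intro y hy hxy
        have := head?_dropWhile (· == x) xs y hy
        simp at this
        exact this (Option.some.inj hxy).symm

-- ---- B side ----

-- Set.add is idempotent
lemma set_add_add (r : PySem.Set Int) (x : Int) :
    PySem.Set.add (PySem.Set.add r x) x = PySem.Set.add r x := by
  by_cases h : x ∈ r <;> simp [PySem.Set.add, PySem.Set.contains, h]

-- folding a constant add over a nonempty list adds once
lemma foldl_const_add (x : Int) :
    ∀ (l : List Int) (r : PySem.Set Int), l ≠ [] →
      l.foldl (fun s (_ : Int) => PySem.Set.add s x) r = PySem.Set.add r x := by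
  intro l
  induction l with
  | nil => intro r h; exact absurd rfl h
  | cons a as ih =>
    intro r _
    match as, ih with
    | [], _ => simp [List.foldl]
    | b :: bs, ih => simpa [List.foldl, set_add_add] using ih (PySem.Set.add r x) (by simp)

-- a fold whose every step is the identity
lemma foldl_noop {α β : Type} (f : β → α → β) :
    ∀ (l : List α) (r : β), (∀ i ∈ l, ∀ s, f s i = s) → l.foldl f r = r := by
  intro l
  induction l with
  | nil => intro r _; rfl
  | cons a as ih =>
    intro r h
    rw [List.foldl_cons, h a (by simp), ih r (fun i hi => h i (by simp [hi]))]

-- window fully inside the run: it is constant, the step adds x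
lemma step_full (n x : Int) (hn : 1 ≤ n) (L : ℕ) (rest : List Int) (i : Int)
    (h1 : n - 1 ≤ i) (h2 : i < L) (r : PySem.Set Int) :
    consecAltStep n (List.replicate L x ++ rest) r i = PySem.Set.add r x := by
  have hwin : PySem.List.slice (List.replicate L x ++ rest) (some (i - n + 1)) (some (i + 1))
      = List.replicate n.toNat x := by
    rw [PySem.List.slice_toNat _ (by omega) (by omega)]
    rw [show (i + 1).toNat - (i - n + 1).toNat = n.toNat from by omega]
    rw [List.drop_append, List.drop_replicate, List.take_append, List.take_replicate]
    simp only [List.length_replicate]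
    rw [show (i - n + 1).toNat - L = 0 from by omega, List.drop_zero,
        show min n.toNat (L - (i - n + 1).toNat) = n.toNat from by omega,
        show n.toNat - (L - (i - n + 1).toNat) = 0 from by omega]
    simp
  unfold consecAltStep
  rw [hwin]
  cases hm : n.toNat with
  | zero => omega
  | succ m =>
    rw [List.replicate_succ]
    simp only [PySem.List.count_eq]
    simp only [show List.count x (x :: List.replicate m x) = m + 1 from by
      rw [← List.replicate_succ, List.count_replicate]; simp]
    rw [if_pos (by rw [beq_iff_eq]; omega)]

-- window crossing the run boundary: it contains x and a different element, no add
lemma step_cross (n x : Int) (hn : 1 ≤ n) (L : ℕ) (y : Int) (rest : List Int)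
    (hy : y ≠ x) (i : Int) (h0 : n - 1 ≤ i) (h1 : (L : Int) ≤ i) (h2 : i < L + n - 1)
    (r : PySem.Set Int) :
    consecAltStep n (List.replicate L x ++ y :: rest) r i = r := by
  have hwin : PySem.List.slice (List.replicate L x ++ y :: rest) (some (i - n + 1)) (some (i + 1))
      = List.replicate (L - (i - n + 1).toNat) x ++
        y :: List.take (n.toNat - (L - (i - n + 1).toNat) - 1) rest := by
    rw [PySem.List.slice_toNat _ (by omega) (by omega)]
    rw [show (i + 1).toNat - (i - n + 1).toNat = n.toNat from by omega]
    rw [List.drop_append, List.drop_replicate, List.take_append, List.take_replicate]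
    simp only [List.length_replicate]
    rw [show (i - n + 1).toNat - L = 0 from by omega, List.drop_zero,
        show min n.toNat (L - (i - n + 1).toNat) = L - (i - n + 1).toNat from by omega]
    rw [List.take_cons (by omega)]
  have hL1 : 1 ≤ L - (i - n + 1).toNat := by omega
  have hcnt : List.count x (List.replicate (L - (i - n + 1).toNat) x ++
        y :: List.take (n.toNat - (L - (i - n + 1).toNat) - 1) rest) < n.toNat := by
    rw [List.count_append, List.count_cons]
    simp only [List.count_replicate, BEq.rfl, if_pos, beq_iff_eq]
    rw [if_neg hy]
    have hc := List.count_le_length (l := List.take (n.toNat - (L - (i - n + 1).toNat) - 1) rest) (a := x)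
    have hlen := List.length_take_le (n.toNat - (L - (i - n + 1).toNat) - 1) rest
    omega
  unfold consecAltStep
  rw [hwin]
  rcases Nat.exists_eq_add_of_le hL1 with ⟨m, hm⟩
  rw [hm] at hcnt
  rw [hm, show 1 + m = m + 1 from by omega, List.replicate_succ, List.cons_append]
  simp only [PySem.List.count_eq]
  rw [if_neg]
  intro hcond
  rw [beq_iff_eq] at hcond
  rw [show x :: (List.replicate m x ++ y :: List.take (n.toNat - (m + 1) - 1) rest)
        = List.replicate (m + 1) x ++ y :: List.take (n.toNat - (m + 1) - 1) rest from by
      rw [List.replicate_succ, List.cons_append]] at hcond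
  rw [show m + 1 = 1 + m from by omega] at hcond
  omega

-- window fully inside the tail: the step only sees the tail, shifted
lemma step_shift (n x : Int) (hn : 1 ≤ n) (L : ℕ) (rest : List Int) (j : Int)
    (hj : n - 1 ≤ j) (r : PySem.Set Int) :
    consecAltStep n (List.replicate L x ++ rest) r ((L : Int) + j) = consecAltStep n rest r j := by
  have hwin : PySem.List.slice (List.replicate L x ++ rest) (some ((L : Int) + j - n + 1)) (some ((L : Int) + j + 1))
      = PySem.List.slice rest (some (j - n + 1)) (some (j + 1)) := by
    rw [PySem.List.slice_toNat _ (by omega) (by omega),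
        PySem.List.slice_toNat _ (by omega) (by omega)]
    rw [List.drop_append, List.drop_replicate]
    simp only [List.length_replicate]
    rw [show L - ((L : Int) + j - n + 1).toNat = 0 from by omega,
        show ((L : Int) + j - n + 1).toNat - L = (j - n + 1).toNat from by omega,
        show ((L : Int) + j + 1).toNat - ((L : Int) + j - n + 1).toNat = (j + 1).toNat - (j - n + 1).toNat from by omega]
    simp
  unfold consecAltStep
  rw [hwin]

-- B's fold over one whole maximal run
lemma BFold_run (n x : Int) (hn : 1 ≤ n) (L : ℕ) (hL : 1 ≤ L) (rest : List Int)
    (hfresh : ∀ y, rest.head? = some y → y ≠ x) (r : PySem.Set Int) :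
    (PySem.List.pyRange (n - 1) ((List.replicate L x ++ rest).length : Int) 1).foldl
        (consecAltStep n (List.replicate L x ++ rest)) r
    = (PySem.List.pyRange (n - 1) (rest.length : Int) 1).foldl (consecAltStep n rest)
        (if n ≤ (L : Int) then PySem.Set.add r x else r) := by
  have hlen : ((List.replicate L x ++ rest).length : Int) = (L : Int) + rest.length := by
    simp
  rw [hlen]
  by_cases hsmall : (L : Int) + rest.length ≤ n - 1
  · rw [PySem.List.pyRange_one_eq_nil hsmall,
        PySem.List.pyRange_one_eq_nil (by omega),
        if_neg (by omega)]
    rfl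
  · have h0 : n - 1 ≤ max (n - 1) (L : Int) := le_max_left _ _
    have h1 : max (n - 1) (L : Int) ≤ min ((L : Int) + n - 1) ((L : Int) + rest.length) := by omega
    have h2 : min ((L : Int) + n - 1) ((L : Int) + rest.length) ≤ (L : Int) + rest.length := by omega
    rw [PySem.List.pyRange_one_append (n - 1) (max (n - 1) (L : Int)) ((L : Int) + rest.length)
          h0 (by omega),
        PySem.List.pyRange_one_append (max (n - 1) (L : Int))
          (min ((L : Int) + n - 1) ((L : Int) + rest.length)) ((L : Int) + rest.length) h1 h2,
        List.foldl_append, List.foldl_append]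
    -- segment 1: [n-1, max (n-1) L)
    have hseg1 : (PySem.List.pyRange (n - 1) (max (n - 1) (L : Int)) 1).foldl
        (consecAltStep n (List.replicate L x ++ rest)) r
        = (if n ≤ (L : Int) then PySem.Set.add r x else r) := by
      by_cases hnL : n ≤ (L : Int)
      · rw [if_pos hnL,
            PySem.List.foldl_congr_mem _ _ (fun s (_ : Int) => PySem.Set.add s x) r
              (fun acc i hi => by
                have hm := (PySem.List.mem_pyRange_one).mp hi
                exact step_full n x hn L rest i (by omega) (by omega) acc)]
        exact foldl_const_add x _ r
          (List.ne_nil_of_length_pos (by rw [PySem.List.length_pyRange_one]; omega))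
      · rw [if_neg hnL, show max (n - 1) (L : Int) = n - 1 from by omega,
            PySem.List.pyRange_one_eq_nil le_rfl]
        rfl
    -- segment 2: [max (n-1) L, min (L+n-1) (L+restlen)) — crossing windows, no-ops
    have hseg2 : ∀ s, (PySem.List.pyRange (max (n - 1) (L : Int))
          (min ((L : Int) + n - 1) ((L : Int) + rest.length)) 1).foldl
        (consecAltStep n (List.replicate L x ++ rest)) s = s := by
      intro s
      match rest, hfresh with
      | [], _ =>
        rw [show min ((L : Int) + n - 1) ((L : Int) + ([] : List Int).length) = (L : Int) from by
              simp; omega,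
            show max (n - 1) (L : Int) = (L : Int) from by simp at hsmall; omega,
            PySem.List.pyRange_one_eq_nil le_rfl]
        rfl
      | y :: rest', hfresh =>
        refine foldl_noop _ _ s (fun i hi s' => ?_)
        have hm := (PySem.List.mem_pyRange_one).mp hi
        exact step_cross n x hn L y rest' (hfresh y rfl) i (by omega) (by omega) (by omega) s'
    -- segment 3: [min (L+n-1) (L+restlen), L+restlen) — shifted tail windows
    have hseg3 : ∀ s, (PySem.List.pyRange
          (min ((L : Int) + n - 1) ((L : Int) + rest.length)) ((L : Int) + rest.length) 1).foldl
        (consecAltStep n (List.replicate L x ++ rest)) s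
        = (PySem.List.pyRange (n - 1) (rest.length : Int) 1).foldl (consecAltStep n rest) s := by
      intro s
      by_cases htail : (L : Int) + rest.length ≤ (L : Int) + n - 1
      · rw [show min ((L : Int) + n - 1) ((L : Int) + rest.length) = (L : Int) + rest.length
              from by omega,
            PySem.List.pyRange_one_eq_nil le_rfl,
            PySem.List.pyRange_one_eq_nil (by omega)]
        rfl
      · rw [show min ((L : Int) + n - 1) ((L : Int) + rest.length) = (L : Int) + n - 1
              from by omega]
        have hmap : PySem.List.pyRange ((L : Int) + n - 1) ((L : Int) + rest.length) 1
            = (PySem.List.pyRange (n - 1) (rest.length : Int) 1).map (fun j => (L : Int) + j) := by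
          rw [PySem.List.pyRange_one, PySem.List.pyRange_one, List.map_map]
          rw [show ((L : Int) + rest.length - ((L : Int) + n - 1)) = ((rest.length : Int) - (n - 1))
                from by ring]
          refine List.map_congr_left (fun k _ => ?_)
          simp only [Function.comp_apply]
          ring
        rw [hmap, List.foldl_map]
        refine PySem.List.foldl_congr_mem _ _ _ s (fun acc j hj => ?_)
        have hm := (PySem.List.mem_pyRange_one).mp hj
        exact step_shift n x hn L rest j (by omega) acc
    rw [hseg1, hseg2, hseg3]

-- B's index fold computes the run scan
lemma BFold_eq_runScan (n : Int) (hn : 1 ≤ n) :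
    ∀ (k : ℕ) (l : List Int), l.length ≤ k → ∀ (r : PySem.Set Int),
      (PySem.List.pyRange (n - 1) (l.length : Int) 1).foldl (consecAltStep n l) r = runScan n l r := by
  intro k
  induction k with
  | zero =>
    intro l hl r
    rw [List.length_eq_zero_iff.mp (Nat.le_zero.mp hl)]
    rw [PySem.List.pyRange_one_eq_nil (by simp; omega)]
    simp [runScan]
  | succ k ih =>
    intro l hl r
    match l with
    | [] =>
      rw [PySem.List.pyRange_one_eq_nil (by simp; omega)]
      simp [runScan]
    | x :: xs =>
      have hdecomp : x :: xs =
          List.replicate ((xs.takeWhile (· == x)).length + 1) x ++ xs.dropWhile (· == x) := by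
        conv_lhs => rw [← List.takeWhile_append_dropWhile (p := (· == x)) (l := xs),
                        takeWhile_eq_replicate x xs]
        simp [List.replicate_succ]
      conv_lhs => rw [hdecomp]
      rw [BFold_run n x hn _ (by omega) _
            (fun y hy => by
              have := head?_dropWhile (· == x) xs y hy
              simpa using this),
          ih _ (le_trans (List.length_dropWhile_le _ _) (by simpa using hl)),
          runScan,
          show ((((xs.takeWhile (· == x)).length + 1 : ℕ)) : Int)
              = ((xs.takeWhile (· == x)).length : Int) + 1 by push_cast; ring]

-- ===== VERDICT (by name: the statement is the Claim_ definition above) =====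
theorem consec_spec : Claim_equal_consec := by
  intro n iterable _
  unfold Spec_consec consec consec_alt
  by_cases hn : 1 ≤ n
  · rw [if_pos hn,
        consecLoop_eq_runScan n hn iterable.length iterable le_rfl none 0 _ (by intro x _; simp),
        BFold_eq_runScan n hn iterable.length iterable le_rfl]
  · rw [if_neg hn]
    exact consecLoop_nonpos n (by omega) iterable none 0 _ le_rfl
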